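-- pv_equiv track=rewrite | github.com/mohammadfaiizan/ProjectI | DSA/Problem/Graph/06_Minimum_Spanning_Tree_MST/MST_with_Constraints.py | capacitated_mst
-- ===== SOURCE A (Python) =====
-- from typing import List, Tuple, Dict, Set, Optional
--
-- def capacitated_mst(n: int, edges: List[List[int]],
--                    capacities: List[int], demand: List[int],
--                    root: int) -> Tuple[int, List[Tuple[int, int]]]:
--     """
--     Capacitated MST (CMST)
--
--     MST where each subtree's demand doesn't exceed edge capacities.
--
--     Time: O(E^2 * α(V)) - approximate algorithm
--     Space: O(V + E)
--     """
--     # Simplified capacitated MST using approximation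
--     sorted_edges = sorted(edges, key=lambda x: x[2])
--
--     uf = UnionFind(n)
--     total_cost = 0
--     mst_edges = []
--     subtree_demand = demand[:]
--
--     for u, v, cost in sorted_edges:
--         if uf.find(u) != uf.find(v):
--             # Check capacity constraint
--             root_u, root_v = uf.find(u), uf.find(v)
--             combined_demand = subtree_demand[root_u] + subtree_demand[root_v]
--
--             # Find minimum capacity on path to root
--             min_capacity = min(capacities[u], capacities[v])
--
--             if combined_demand <= min_capacity and uf.union(u, v):
--                 total_cost += cost
--                 mst_edges.append((u, v))
--
--                 # Update demand for new root
--                 new_root = uf.find(u)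
--                 subtree_demand[new_root] = combined_demand
--
--                 if len(mst_edges) == n - 1:
--                     break
--
--     return total_cost, mst_edges
--
-- class UnionFind:
--     """Optimized Union-Find data structure"""
--
--     def __init__(self, n: int):
--         self.parent = list(range(n))
--         self.rank = [0] * n
--         self.components = n
--
--     def find(self, x: int) -> int:
--         if self.parent[x] != x:
--             self.parent[x] = self.find(self.parent[x])
--         return self.parent[x]
--
--     def union(self, x: int, y: int) -> bool:
--         px, py = self.find(x), self.find(y)
--
--         if px == py:
--             return False
--
--         if self.rank[px] < self.rank[py]:
--             px, py = py, px
--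
--         self.parent[py] = px
--         if self.rank[px] == self.rank[py]:
--             self.rank[px] += 1
--
--         self.components -= 1
--         return True
-- ===== SOURCE B (Python) =====
-- def capacitated_mst(n, edges, capacities, demand, root):
--     # No maintained connectivity or demand structure: only the list of accepted
--     # edges is kept; each candidate edge's endpoint components are recomputed as
--     # a fixpoint closure over the accepted edges, and demands are summed from the
--     # original demand list.
--     total_cost = 0
--     mst_edges = []
--     for u, v, cost in sorted(edges, key=lambda e: e[2]):
--         cu = _component(mst_edges, u)
--         if v in cu:
--             continue
--         cv = _component(mst_edges, v)
--         combined = sum(demand[x] for x in cu) + sum(demand[x] for x in cv)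
--         if combined <= min(capacities[u], capacities[v]):
--             total_cost += cost
--             mst_edges.append((u, v))
--             if len(mst_edges) == n - 1:
--                 break
--     return total_cost, mst_edges
--
-- def _component(mst_edges, s):
--     comp = {s}
--     changed = True
--     while changed:
--         changed = False
--         for a, b in mst_edges:
--             if (a in comp) != (b in comp):
--                 comp.add(a)
--                 comp.add(b)
--                 changed = True
--     return comp
-- ===== Notes on version B (the rewrite author's own statement) =====
-- stated objective: alternative
-- what changed: B keeps no connectivity or demand structure at all (A maintains a rank/path-compression union-find plus cached subtree demands): per candidate edge it recomputes the endpoint's component as a fixpoint closure over the accepted-edge list and sums the original demand entries of that component directly.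
-- outside the precondition, e.g. on capacitated_mst(2, [[-1, 0, 3]], [5, 5], [1, 1], 0): A returns (3, [(-1, 0)]), B returns (3, [(-1, 0)]); on capacitated_mst(3, [[0, 1, 5]], [2, 2], [1, 1], 0): A returns (5, [(0, 1)]), B returns (5, [(0, 1)])
import Mathlib
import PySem

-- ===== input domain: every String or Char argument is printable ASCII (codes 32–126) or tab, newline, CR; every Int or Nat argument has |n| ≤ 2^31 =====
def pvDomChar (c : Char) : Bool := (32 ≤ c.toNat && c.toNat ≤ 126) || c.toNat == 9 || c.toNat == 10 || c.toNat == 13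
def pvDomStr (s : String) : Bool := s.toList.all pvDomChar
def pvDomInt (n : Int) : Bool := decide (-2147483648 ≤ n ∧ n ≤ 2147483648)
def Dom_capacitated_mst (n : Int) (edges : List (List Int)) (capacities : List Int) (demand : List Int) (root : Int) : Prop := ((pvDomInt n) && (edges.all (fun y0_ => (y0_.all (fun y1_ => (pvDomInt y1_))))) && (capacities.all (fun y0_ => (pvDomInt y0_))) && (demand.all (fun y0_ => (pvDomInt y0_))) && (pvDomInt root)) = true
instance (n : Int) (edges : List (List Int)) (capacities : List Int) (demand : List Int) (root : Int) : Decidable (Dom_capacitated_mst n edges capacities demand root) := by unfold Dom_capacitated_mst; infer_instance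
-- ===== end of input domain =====

-- B maintains no connectivity or demand structure at all: it keeps only the accepted-edge list and,
-- per candidate edge, recomputes the endpoint's component as a fixpoint closure over accepted edges,
-- summing the original demands (objective: alternative; return-value equivalence, no argument mutation).

-- shared indexing helpers: Python xs[i] read / write (total forms; all indices used inside Pre_ are in range)
def lget (l : List Int) (i : Int) : Int := PySem.List.pyGetD l i 0
def lset (l : List Int) (i v : Int) : List Int := PySem.List.pySetD l i v

-- ===== PORT A =====
-- UnionFind.find with path compression (fuel = list length at call site; Python recursion
-- terminates on exactly the inputs Pre_ admits, where chains reach a root within p.length steps)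
def ufFind : Nat → List Int → Int → List Int × Int
  | 0, p, x => (p, x)
  | fuel+1, p, x =>
    let px := lget p x
    if px ≠ x then
      let pr := ufFind fuel p px
      let p' := lset pr.1 x pr.2
      (p', lget p' x)
    else (p, px)

-- UnionFind.union (returns new parent, new rank, success flag; the `components` counter of the
-- Python class is dropped: it is never read by capacitated_mst)
def ufUnion (p rank : List Int) (x y : Int) : List Int × List Int × Bool :=
  let f1 := ufFind p.length p x
  let f2 := ufFind f1.1.length f1.1 y
  let px := f1.2
  let py := f2.2
  if px = py then (f2.1, rank, false)
  else
    let pq := if lget rank px < lget rank py then (py, px) else (px, py)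
    let p3 := lset f2.1 pq.2 pq.1
    let rank' := if lget rank pq.1 = lget rank pq.2 then lset rank pq.1 (lget rank pq.1 + 1) else rank
    (p3, rank', true)

-- the for-loop of A (early `break` = returning directly)
def aLoop (n : Int) (capacities : List Int) :
    List (List Int) → List Int → List Int → List Int → Int → List (Int × Int) → Int × (List (Int × Int))
  | [], _, _, _, tc, mst => (tc, mst)
  | e :: rest, p, rank, sd, tc, mst =>
    let u := lget e 0
    let v := lget e 1
    let cost := lget e 2
    let f1 := ufFind p.length p u
    let f2 := ufFind f1.1.length f1.1 v
    if f1.2 ≠ f2.2 then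
      let f3 := ufFind f2.1.length f2.1 u
      let f4 := ufFind f3.1.length f3.1 v
      let combined := lget sd f3.2 + lget sd f4.2
      let minCap := min (lget capacities u) (lget capacities v)
      if combined ≤ minCap then
        let un := ufUnion f4.1 rank u v
        if un.2.2 then
          let tc' := tc + cost
          let mst' := mst ++ [(u, v)]
          let f5 := ufFind un.1.length un.1 u
          let sd' := lset sd f5.2 combined
          if (mst'.length : Int) = n - 1 then (tc', mst')
          else aLoop n capacities rest f5.1 un.2.1 sd' tc' mst'
        else aLoop n capacities rest un.1 un.2.1 sd tc mst
      else aLoop n capacities rest f4.1 rank sd tc mst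
    else aLoop n capacities rest f2.1 rank sd tc mst

def capacitated_mst (n : Int) (edges : List (List Int)) (capacities : List Int) (demand : List Int) (root : Int) : Int × (List (Int × Int)) :=
  aLoop n capacities (PySem.List.sorted edges (fun e => lget e 2) false)
    (PySem.List.pyRange 0 n 1) (List.replicate n.toNat 0) demand 0 []

-- ===== PORT B =====
-- one pass of B's inner `for a, b in mst_edges` loop: grow `comp`, record whether it changed
def bStep : List (Int × Int) → PySem.Set Int → Bool → PySem.Set Int × Bool
  | [], comp, ch => (comp, ch)
  | (a, b) :: rest, comp, ch =>
    if (PySem.Set.contains comp a) != (PySem.Set.contains comp b) then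
      bStep rest (PySem.Set.add (PySem.Set.add comp a) b) true
    else bStep rest comp ch

-- B's `while changed` loop; the fuel bounds the number of passes: each pass that reports a change
-- strictly grows `comp`, which has at most 2*|mst|+1 possible members, so the fuel supplied at the
-- call site always reaches the Python loop's fixpoint (proved in bClosure_closed below)
def bClosure : Nat → List (Int × Int) → PySem.Set Int → PySem.Set Int
  | 0, _, comp => comp
  | fuel+1, mst, comp =>
    let st := bStep mst comp false
    if st.2 then bClosure fuel mst st.1 else st.1

-- _component(mst_edges, s)
def bComponent (mst : List (Int × Int)) (s : Int) : PySem.Set Int :=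
  bClosure (2 * mst.length + 2) mst (PySem.Set.ofList [s])

-- B's main loop over the sorted edges; only the accepted-edge list and the running cost are kept
-- (the sums consume the set's elements commutatively, so Python's set iteration order is immaterial)
def bLoop (n : Int) (caps dem : List Int) :
    List (List Int) → List (Int × Int) → Int → Int × (List (Int × Int))
  | [], mst, tc => (tc, mst)
  | e :: rest, mst, tc =>
    let u := lget e 0
    let v := lget e 1
    let cost := lget e 2
    let cu := bComponent mst u
    if PySem.Set.contains cu v then bLoop n caps dem rest mst tc
    else
      let cv := bComponent mst v
      let combined := (cu.map (fun x => lget dem x)).sum + (cv.map (fun x => lget dem x)).sum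
      if combined ≤ min (lget caps u) (lget caps v) then
        let tc' := tc + cost
        let mst' := mst ++ [(u, v)]
        if (mst'.length : Int) = n - 1 then (tc', mst')
        else bLoop n caps dem rest mst' tc'
      else bLoop n caps dem rest mst tc

def capacitated_mst_alt (n : Int) (edges : List (List Int)) (capacities : List Int) (demand : List Int) (root : Int) : Int × (List (Int × Int)) :=
  bLoop n capacities demand (PySem.List.sorted edges (fun e => lget e 2) false) [] 0

-- ===== PRECONDITION & SPEC =====
-- Pre_ is the natural domain of the graph algorithm: 0 ≤ n, every edge a 3-list [u,v,cost] with
-- endpoints in [0,n), and capacity/demand lists covering all n nodes (or no edges at all, where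
-- nothing is read). It excludes malformed inputs on which A may still return by accident of
-- Python's negative-index wraparound or lazily unread short capacity/demand lists.
def Pre_capacitated_mst (n : Int) (edges : List (List Int)) (capacities : List Int) (demand : List Int) (root : Int) : Prop :=
  edges = [] ∨
    (0 ≤ n ∧ n ≤ (capacities.length : Int) ∧ n ≤ (demand.length : Int) ∧
      ∀ e ∈ edges, e.length = 3 ∧ ∀ x ∈ e.take 2, 0 ≤ x ∧ x < n)
instance (n : Int) (edges : List (List Int)) (capacities : List Int) (demand : List Int) (root : Int) : Decidable (Pre_capacitated_mst n edges capacities demand root) := by unfold Pre_capacitated_mst; infer_instance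

def pvWitness_capacitated_mst : Int × List (List Int) × List Int × List Int × Int :=
  (3, [[0, 1, 4], [1, 2, 2], [0, 2, 5]], [10, 10, 10], [1, 1, 1], 0)

def Spec_capacitated_mst (n : Int) (edges : List (List Int)) (capacities : List Int) (demand : List Int) (root : Int) (out : Int × (List (Int × Int))) : Prop := out = capacitated_mst_alt n edges capacities demand root
instance (n : Int) (edges : List (List Int)) (capacities : List Int) (demand : List Int) (root : Int) (out : Int × (List (Int × Int))) : Decidable (Spec_capacitated_mst n edges capacities demand root out) := by unfold Spec_capacitated_mst; infer_instance

-- ===== CLAIM (what is proved, stated in full; the proofs are below) =====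
def Claim_equal_capacitated_mst : Prop := ∀ (n : Int) (edges : List (List Int)) (capacities : List Int) (demand : List Int) (root : Int), Dom_capacitated_mst n edges capacities demand root → Pre_capacitated_mst n edges capacities demand root → Spec_capacitated_mst n edges capacities demand root (capacitated_mst n edges capacities demand root)

-- ===== LEMMAS AND PROOFS =====

-- ===== middle layer (proof-only): a flat component-label loop, bridging A's union-find to B's closures =====
def midLoop (n : Int) (capacities : List Int) :
    List (List Int) → List Int → List Int → Int → List (Int × Int) → Int × (List (Int × Int))
  | [], _, _, tc, mst => (tc, mst)
  | e :: rest, comp, cd, tc, mst =>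
    let u := lget e 0
    let v := lget e 1
    let cost := lget e 2
    let cu := lget comp u
    let cv := lget comp v
    if cu = cv then midLoop n capacities rest comp cd tc mst
    else
      let combined := lget cd cu + lget cd cv
      if min (lget capacities u) (lget capacities v) < combined then
        midLoop n capacities rest comp cd tc mst
      else
        let comp' := comp.map (fun c => if c = cv then cu else c)
        let cd' := lset cd cu combined
        let tc' := tc + cost
        let mst' := mst ++ [(u, v)]
        if (mst'.length : Int) = n - 1 then (tc', mst')
        else midLoop n capacities rest comp' cd' tc' mst'

-- ===== layer 1: A's union-find loop equals the label loop =====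

-- parent-pointer iteration and the "x's root is r" relation
def iterp (p : List Int) : Nat → Int → Int
  | 0, x => x
  | k+1, x => iterp p k (lget p x)

def Reaches (p : List Int) (x r : Int) : Prop := ∃ k, iterp p k x = r ∧ lget p r = r

-- parent array well-formedness over node set [0,L)
def WF (L : Nat) (p : List Int) : Prop :=
  p.length = L ∧
  (∀ x : Int, 0 ≤ x → x < (L : Int) → 0 ≤ lget p x ∧ lget p x < (L : Int)) ∧
  (∀ x : Int, 0 ≤ x → x < (L : Int) → ∃ r, Reaches p x r)

-- the coupling invariant between A's state (p, sd) and the label state (comp, cd)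
def Coupled (L : Nat) (p sd comp cd : List Int) : Prop :=
  WF L p ∧ comp.length = L ∧ cd.length = L ∧ L ≤ sd.length ∧
  (∀ x : Int, 0 ≤ x → x < (L : Int) → 0 ≤ lget comp x ∧ lget comp x < (L : Int)) ∧
  (∀ x y : Int, 0 ≤ x → x < (L : Int) → 0 ≤ y → y < (L : Int) →
    ((∃ r, Reaches p x r ∧ Reaches p y r) ↔ lget comp x = lget comp y)) ∧
  (∀ x r : Int, 0 ≤ x → x < (L : Int) → Reaches p x r → lget sd r = lget cd (lget comp x))

lemma length_lset (l : List Int) (i v : Int) : (lset l i v).length = l.length := by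
  simp [lset, PySem.List.length_pySetD]

lemma lget_eq_getElem (l : List Int) (i : Int) (h0 : 0 ≤ i) (h1 : i < (l.length : Int)) :
    lget l i = l[i.toNat]'(by omega) := by
  simp only [lget]
  exact PySem.List.pyGetD_eq_getElem l 0 h0 h1

lemma lget_lset_self (l : List Int) (i v : Int) (h0 : 0 ≤ i) (h1 : i < (l.length : Int)) :
    lget (lset l i v) i = v := by
  rw [lset, PySem.List.pySetD_of_nonneg l v h0,
    lget_eq_getElem _ _ h0 (by simpa using h1)]
  simp

lemma lget_lset_ne (l : List Int) (i v j : Int) (hi0 : 0 ≤ i) (_hi1 : i < (l.length : Int))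
    (hj0 : 0 ≤ j) (hj1 : j < (l.length : Int)) (hne : j ≠ i) : lget (lset l i v) j = lget l j := by
  rw [lset, PySem.List.pySetD_of_nonneg l v hi0,
    lget_eq_getElem _ _ hj0 (by simpa using hj1),
    lget_eq_getElem _ _ hj0 hj1]
  rw [List.getElem_set]
  simp only [if_neg (by omega : ¬ i.toNat = j.toNat)]

lemma iterp_succ (p : List Int) (k : Nat) (x : Int) :
    iterp p (k+1) x = lget p (iterp p k x) := by
  induction k generalizing x with
  | zero => rfl
  | succ k ih =>
    show iterp p (k+1) (lget p x) = lget p (iterp p (k+1) x)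
    rw [ih (lget p x)]
    rfl

lemma iterp_add (p : List Int) (a b : Nat) (x : Int) :
    iterp p (a+b) x = iterp p b (iterp p a x) := by
  induction b with
  | zero => rfl
  | succ b ih => rw [← Nat.add_assoc, iterp_succ, ih, ← iterp_succ]

lemma iterp_fix (p : List Int) (r : Int) (h : lget p r = r) (k : Nat) : iterp p k r = r := by
  induction k with
  | zero => rfl
  | succ k ih => show iterp p k (lget p r) = r; rw [h]; exact ih

lemma reaches_unique {p : List Int} {x r r' : Int}
    (h1 : Reaches p x r) (h2 : Reaches p x r') : r = r' := by
  obtain ⟨k1, e1, f1⟩ := h1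
  obtain ⟨k2, e2, f2⟩ := h2
  rcases Nat.le_total k1 k2 with h | h
  · have : iterp p k2 x = r := by
      rw [show k2 = k1 + (k2 - k1) by omega, iterp_add, e1, iterp_fix p r f1]
    omega
  · have : iterp p k1 x = r' := by
      rw [show k1 = k2 + (k1 - k2) by omega, iterp_add, e2, iterp_fix p r' f2]
    omega

lemma iterp_range {L : Nat} {p : List Int}
    (hrange : ∀ z : Int, 0 ≤ z → z < (L : Int) → 0 ≤ lget p z ∧ lget p z < (L : Int))
    {x : Int} (hx0 : 0 ≤ x) (hx1 : x < (L : Int)) (k : Nat) :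
    0 ≤ iterp p k x ∧ iterp p k x < (L : Int) := by
  induction k generalizing x with
  | zero => exact ⟨hx0, hx1⟩
  | succ k ih =>
    show 0 ≤ iterp p k (lget p x) ∧ _
    obtain ⟨h0, h1⟩ := hrange x hx0 hx1
    exact ih h0 h1

lemma reaches_range {L : Nat} {p : List Int}
    (hrange : ∀ z : Int, 0 ≤ z → z < (L : Int) → 0 ≤ lget p z ∧ lget p z < (L : Int))
    {x r : Int} (hx0 : 0 ≤ x) (hx1 : x < (L : Int)) (h : Reaches p x r) :
    0 ≤ r ∧ r < (L : Int) := by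
  obtain ⟨k, e, _⟩ := h
  rw [← e]; exact iterp_range hrange hx0 hx1 k

lemma reaches_fuel {L : Nat} {p : List Int}
    (hrange : ∀ z : Int, 0 ≤ z → z < (L : Int) → 0 ≤ lget p z ∧ lget p z < (L : Int))
    {x r : Int} (hx0 : 0 ≤ x) (hx1 : x < (L : Int)) (h : Reaches p x r) :
    ∃ k ≤ L, iterp p k x = r ∧ lget p r = r := by
  obtain ⟨k0, e0, f0⟩ := h
  by_cases hk : k0 ≤ L
  · exact ⟨k0, hk, e0, f0⟩
  · have key : ∀ i j : Nat, i < j → j ≤ L → iterp p i x = iterp p j x →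
        iterp p i x = r := by
      intro i j hij hjL heq
      have per : ∀ t : Nat, iterp p (i + t*(j-i)) x = iterp p i x := by
        intro t
        induction t with
        | zero => simp
        | succ t ih =>
          rw [show i + (t+1)*(j-i) = (i + t*(j-i)) + (j-i) by ring, iterp_add, ih,
            ← iterp_add, show i + (j - i) = j by omega, ← heq]
      have hbig : k0 ≤ i + k0*(j-i) := by
        have : k0 * 1 ≤ k0 * (j - i) := Nat.mul_le_mul_left k0 (by omega)
        omega
      have hfix : iterp p (i + k0*(j-i)) x = r := by
        rw [show i + k0*(j-i) = k0 + ((i + k0*(j-i)) - k0) by omega, iterp_add, e0,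
          iterp_fix p r f0]
      rw [← per k0, hfix]
    obtain ⟨i, j, hne, heq⟩ := Fintype.exists_ne_map_eq_of_card_lt
      (fun i : Fin (L+1) =>
        (⟨(iterp p (i : Nat) x).toNat, by
          have := iterp_range hrange hx0 hx1 (i : Nat)
          omega⟩ : Fin L))
      (by simp)
    have hval : iterp p (i : Nat) x = iterp p (j : Nat) x := by
      have h1 := iterp_range hrange hx0 hx1 (i : Nat)
      have h2 := iterp_range hrange hx0 hx1 (j : Nat)
      have h3 : (iterp p (i : Nat) x).toNat = (iterp p (j : Nat) x).toNat :=
        congrArg Fin.val heq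
      omega
    rcases Nat.lt_trichotomy (i : Nat) (j : Nat) with hij | hij | hij
    · exact ⟨i, by omega, key i j hij (by omega) hval, f0⟩
    · exact absurd (Fin.ext hij) hne
    · exact ⟨j, by omega, key j i hij (by omega) hval.symm, f0⟩

-- pointing a node at its own root preserves every root
lemma reaches_set_root {L : Nat} {p : List Int} (hlen : p.length = L)
    (hrange : ∀ z : Int, 0 ≤ z → z < (L : Int) → 0 ≤ lget p z ∧ lget p z < (L : Int))
    {x r : Int} (hx0 : 0 ≤ x) (hx1 : x < (L : Int)) (hr : Reaches p x r) :
    ∀ z w : Int, 0 ≤ z → z < (L : Int) → Reaches p z w → Reaches (lset p x r) z w := by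
  have hr0 : 0 ≤ r ∧ r < (L : Int) := reaches_range hrange hx0 hx1 hr
  have hset_self : lget (lset p x r) x = r := lget_lset_self p x r hx0 (by omega)
  have hset_ne : ∀ j : Int, 0 ≤ j → j < (L : Int) → j ≠ x → lget (lset p x r) j = lget p j := by
    intro j hj0 hj1 hne
    exact lget_lset_ne p x r j hx0 (by omega) hj0 (by omega) hne
  have hroot' : lget (lset p x r) r = r := by
    by_cases hrx : r = x
    · rw [hrx]; rw [hrx] at hset_self; exact hset_self
    · rw [hset_ne r hr0.1 hr0.2 hrx]
      obtain ⟨_, _, f⟩ := hr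
      exact f
  have hxr : Reaches (lset p x r) x r :=
    ⟨1, by show lget (lset p x r) x = r; exact hset_self, hroot'⟩
  intro z w hz0 hz1 hzw
  obtain ⟨k, e, f⟩ := hzw
  revert z
  induction k with
  | zero =>
    intro z hz0 hz1 e
    have hzw : z = w := e
    subst hzw
    by_cases hwx : z = x
    · subst hwx
      have hrz : r = z := reaches_unique hr ⟨0, rfl, f⟩
      subst hrz
      exact hxr
    · exact ⟨0, rfl, by rw [hset_ne z hz0 hz1 hwx]; exact f⟩
  | succ k ih =>
    intro z hz0 hz1 e
    by_cases hzx : z = x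
    · subst hzx
      have hwr : w = r := reaches_unique ⟨k+1, e, f⟩ hr
      rw [hwr]
      exact hxr
    · have hz1' := hrange z hz0 hz1
      have e' : iterp p k (lget p z) = w := e
      obtain ⟨k', e2, f2⟩ := ih (lget p z) hz1'.1 hz1'.2 e'
      exact ⟨k'+1, by
        show iterp (lset p x r) k' (lget (lset p x r) z) = w
        rw [hset_ne z hz0 hz1 hzx]; exact e2, f2⟩

-- linking root `lose` under root `keep` re-roots exactly `lose`'s class
lemma reaches_set_merge {L : Nat} {p : List Int} (hlen : p.length = L)
    (hrange : ∀ z : Int, 0 ≤ z → z < (L : Int) → 0 ≤ lget p z ∧ lget p z < (L : Int))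
    {keep lose : Int} (hk0 : 0 ≤ keep) (hk1 : keep < (L : Int)) (hl0 : 0 ≤ lose)
    (hl1 : lose < (L : Int)) (hkroot : lget p keep = keep) (hlroot : lget p lose = lose)
    (hkl : keep ≠ lose) :
    ∀ z w : Int, 0 ≤ z → z < (L : Int) → Reaches p z w →
      Reaches (lset p lose keep) z (if w = lose then keep else w) := by
  have hset_self : lget (lset p lose keep) lose = keep := lget_lset_self p lose keep hl0 (by omega)
  have hset_ne : ∀ j : Int, 0 ≤ j → j < (L : Int) → j ≠ lose →
      lget (lset p lose keep) j = lget p j := by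
    intro j hj0 hj1 hne
    exact lget_lset_ne p lose keep j hl0 (by omega) hj0 (by omega) hne
  have hkroot' : lget (lset p lose keep) keep = keep := by
    rw [hset_ne keep hk0 hk1 hkl]; exact hkroot
  have hlk : Reaches (lset p lose keep) lose keep :=
    ⟨1, by show lget (lset p lose keep) lose = keep; exact hset_self, hkroot'⟩
  intro z w hz0 hz1 hzw
  obtain ⟨k, e, f⟩ := hzw
  revert z
  induction k with
  | zero =>
    intro z hz0 hz1 e
    have hzw : z = w := e
    subst hzw
    by_cases hwl : z = lose
    · rw [if_pos hwl]
      subst hwl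
      exact hlk
    · rw [if_neg hwl]
      exact ⟨0, rfl, by rw [hset_ne z hz0 hz1 hwl]; exact f⟩
  | succ k ih =>
    intro z hz0 hz1 e
    by_cases hzl : z = lose
    · subst hzl
      have hwl : w = z := reaches_unique ⟨k+1, e, f⟩ ⟨0, rfl, hlroot⟩
      rw [hwl, if_pos rfl]
      exact hlk
    · have hz1' := hrange z hz0 hz1
      have e' : iterp p k (lget p z) = w := e
      obtain ⟨k', e2, f2⟩ := ih (lget p z) hz1'.1 hz1'.2 e'
      exact ⟨k'+1, by
        show iterp (lset p lose keep) k' (lget (lset p lose keep) z) = _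
        rw [hset_ne z hz0 hz1 hzl]; exact e2, f2⟩

-- correctness of the fueled path-compressing find
lemma find_spec {L : Nat} (p : List Int) (hlen : p.length = L)
    (hrange : ∀ z : Int, 0 ≤ z → z < (L : Int) → 0 ≤ lget p z ∧ lget p z < (L : Int)) :
    ∀ (fuel : Nat) (x r : Int), 0 ≤ x → x < (L : Int) →
    (∃ k ≤ fuel, iterp p k x = r ∧ lget p r = r) →
    (ufFind fuel p x).2 = r ∧ (ufFind fuel p x).1.length = L ∧
    (∀ z : Int, 0 ≤ z → z < (L : Int) →
      0 ≤ lget (ufFind fuel p x).1 z ∧ lget (ufFind fuel p x).1 z < (L : Int)) ∧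
    (∀ z w : Int, 0 ≤ z → z < (L : Int) → Reaches p z w → Reaches (ufFind fuel p x).1 z w) := by
  intro fuel
  induction fuel with
  | zero =>
    intro x r hx0 hx1 h
    obtain ⟨k, hk, e, f⟩ := h
    have hk0 : k = 0 := by omega
    subst hk0
    exact ⟨e, hlen, hrange, fun z w _ _ h => h⟩
  | succ fuel ih =>
    intro x r hx0 hx1 h
    obtain ⟨k, hk, e, f⟩ := h
    by_cases hpx : lget p x = x
    · -- x is its own root
      have hr : r = x := reaches_unique ⟨k, e, f⟩ ⟨0, rfl, hpx⟩
      have hux : ufFind (fuel+1) p x = (p, lget p x) := by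
        simp only [ufFind]
        rw [if_neg (by simp [hpx])]
      rw [hux]
      refine ⟨?_, hlen, hrange, fun z w _ _ h => h⟩
      show lget p x = r
      rw [hpx, hr]
    · have hk0 : k ≠ 0 := by
        intro hz; subst hz
        have hxr : x = r := e
        exact hpx (by rw [hxr]; exact f)
      obtain ⟨k', rfl⟩ : ∃ k', k = k' + 1 := ⟨k - 1, by omega⟩
      have hpxb := hrange x hx0 hx1
      have e1 : iterp p k' (lget p x) = r := e
      obtain ⟨ihval, ihlen, ihrange, ihpres⟩ :=
        ih (lget p x) r hpxb.1 hpxb.2 ⟨k', by omega, e1, f⟩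
      have hux : ufFind (fuel+1) p x =
          (lset (ufFind fuel p (lget p x)).1 x (ufFind fuel p (lget p x)).2,
           lget (lset (ufFind fuel p (lget p x)).1 x (ufFind fuel p (lget p x)).2) x) := by
        simp only [ufFind]
        rw [if_pos hpx]
      set p1 := (ufFind fuel p (lget p x)).1 with hp1
      rw [hux]
      have hrr : Reaches p x r := ⟨k'+1, e, f⟩
      have hrb := reaches_range hrange hx0 hx1 hrr
      have hr1 : Reaches p1 x r := ihpres x r hx0 hx1 hrr
      have hpres2 := reaches_set_root ihlen ihrange hx0 hx1 hr1
      refine ⟨?_, ?_, ?_, ?_⟩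
      · rw [ihval]
        exact lget_lset_self p1 x r hx0 (by rw [ihlen]; omega)
      · rw [length_lset]; exact ihlen
      · intro z hz0 hz1
        by_cases hzx : z = x
        · subst hzx
          rw [ihval, lget_lset_self p1 z r hz0 (by rw [ihlen]; omega)]
          omega
        · rw [ihval, lget_lset_ne p1 x r z hx0 (by rw [ihlen]; omega) hz0 (by rw [ihlen]; omega) hzx]
          exact ihrange z hz0 hz1
      · intro z w hz0 hz1 hzw
        rw [ihval]
        exact hpres2 z w hz0 hz1 (ihpres z w hz0 hz1 hzw)

-- correctness of union when the two roots differ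
set_option maxHeartbeats 1000000 in
lemma union_spec {L : Nat} (p rank : List Int) (hlen : p.length = L)
    (hrange : ∀ z : Int, 0 ≤ z → z < (L : Int) → 0 ≤ lget p z ∧ lget p z < (L : Int))
    (x y rx ry : Int) (hx0 : 0 ≤ x) (hx1 : x < (L : Int)) (hy0 : 0 ≤ y) (hy1 : y < (L : Int))
    (hrx : Reaches p x rx) (hry : Reaches p y ry) (hne : rx ≠ ry) :
    ∃ keep lose, ((keep = rx ∧ lose = ry) ∨ (keep = ry ∧ lose = rx)) ∧
    (ufUnion p rank x y).2.2 = true ∧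
    (ufUnion p rank x y).1.length = L ∧
    (∀ z : Int, 0 ≤ z → z < (L : Int) →
      0 ≤ lget (ufUnion p rank x y).1 z ∧ lget (ufUnion p rank x y).1 z < (L : Int)) ∧
    (∀ z w : Int, 0 ≤ z → z < (L : Int) → Reaches p z w →
      Reaches (ufUnion p rank x y).1 z (if w = lose then keep else w)) := by
  obtain ⟨kx, hkx, ex, fx⟩ := reaches_fuel hrange hx0 hx1 hrx
  obtain ⟨h1val, h1len, h1range, h1pres⟩ :=
    find_spec p hlen hrange p.length x rx hx0 hx1 ⟨kx, by omega, ex, fx⟩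
  set p1 := (ufFind p.length p x).1 with hp1
  have hry1 : Reaches p1 y ry := h1pres y ry hy0 hy1 hry
  obtain ⟨ky, hky, ey, fy⟩ := reaches_fuel h1range hy0 hy1 hry1
  obtain ⟨h2val, h2len, h2range, h2pres⟩ :=
    find_spec p1 h1len h1range p1.length y ry hy0 hy1 ⟨ky, by rw [h1len]; omega, ey, fy⟩
  set p2 := (ufFind p1.length p1 y).1 with hp2
  have hrxb := reaches_range hrange hx0 hx1 hrx
  have hryb := reaches_range hrange hy0 hy1 hry
  have hrx2 : Reaches p2 x rx := h2pres x rx hx0 hx1 (h1pres x rx hx0 hx1 hrx)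
  have hry2 : Reaches p2 y ry := h2pres y ry hy0 hy1 hry1
  have hrxroot : lget p2 rx = rx := by obtain ⟨_, _, hq⟩ := hrx2; exact hq
  have hryroot : lget p2 ry = ry := by obtain ⟨_, _, hq⟩ := hry2; exact hq
  have hpres12 : ∀ z w : Int, 0 ≤ z → z < (L : Int) → Reaches p z w → Reaches p2 z w :=
    fun z w hz0 hz1 hzw => h2pres z w hz0 hz1 (h1pres z w hz0 hz1 hzw)
  by_cases hrk : lget rank rx < lget rank ry
  · have hu : ufUnion p rank x y =
        (lset p2 rx ry,
         (if lget rank ry = lget rank rx then lset rank ry (lget rank ry + 1) else rank),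
         true) := by
      simp only [ufUnion, ← hp1, h1val, ← hp2, h2val]
      rw [if_neg hne, if_pos hrk]
    rw [hu]
    refine ⟨ry, rx, Or.inr ⟨rfl, rfl⟩, rfl, ?_, ?_, ?_⟩
    · rw [length_lset]; exact h2len
    · intro z hz0 hz1
      by_cases hzx : z = rx
      · subst hzx
        rw [lget_lset_self p2 z ry hrxb.1 (by rw [h2len]; omega)]
        omega
      · rw [lget_lset_ne p2 rx ry z hrxb.1 (by rw [h2len]; omega) hz0 (by rw [h2len]; omega) hzx]
        exact h2range z hz0 hz1
    · intro z w hz0 hz1 hzw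
      exact reaches_set_merge h2len h2range hryb.1 hryb.2 hrxb.1 hrxb.2 hryroot hrxroot
        (Ne.symm hne) z w hz0 hz1 (hpres12 z w hz0 hz1 hzw)
  · have hu : ufUnion p rank x y =
        (lset p2 ry rx,
         (if lget rank rx = lget rank ry then lset rank rx (lget rank rx + 1) else rank),
         true) := by
      simp only [ufUnion, ← hp1, h1val, ← hp2, h2val]
      rw [if_neg hne, if_neg hrk]
    rw [hu]
    refine ⟨rx, ry, Or.inl ⟨rfl, rfl⟩, rfl, ?_, ?_, ?_⟩
    · rw [length_lset]; exact h2len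
    · intro z hz0 hz1
      by_cases hzy : z = ry
      · subst hzy
        rw [lget_lset_self p2 z rx hryb.1 (by rw [h2len]; omega)]
        omega
      · rw [lget_lset_ne p2 ry rx z hryb.1 (by rw [h2len]; omega) hz0 (by rw [h2len]; omega) hzy]
        exact h2range z hz0 hz1
    · intro z w hz0 hz1 hzw
      exact reaches_set_merge h2len h2range hrxb.1 hrxb.2 hryb.1 hryb.2 hrxroot hryroot
        hne z w hz0 hz1 (hpres12 z w hz0 hz1 hzw)

-- Coupled transfers along any root-preserving change of the parent array
lemma coupled_transfer {L : Nat} {p p' sd comp cd : List Int} (h : Coupled L p sd comp cd)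
    (hlen' : p'.length = L)
    (hrange' : ∀ z : Int, 0 ≤ z → z < (L : Int) → 0 ≤ lget p' z ∧ lget p' z < (L : Int))
    (hpres : ∀ z w : Int, 0 ≤ z → z < (L : Int) → Reaches p z w → Reaches p' z w) :
    Coupled L p' sd comp cd := by
  obtain ⟨⟨hplen, hprange, hpreach⟩, hclen, hcdlen, hsdlen, hcrange, hiff, hdem⟩ := h
  refine ⟨⟨hlen', hrange', ?_⟩, hclen, hcdlen, hsdlen, hcrange, ?_, ?_⟩
  · intro x hx0 hx1
    obtain ⟨r, hr⟩ := hpreach x hx0 hx1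
    exact ⟨r, hpres x r hx0 hx1 hr⟩
  · intro x y hx0 hx1 hy0 hy1
    obtain ⟨rx, hrx⟩ := hpreach x hx0 hx1
    obtain ⟨ry, hry⟩ := hpreach y hy0 hy1
    constructor
    · intro hex
      obtain ⟨r, hr1, hr2⟩ := hex
      have e1 : r = rx := reaches_unique hr1 (hpres x rx hx0 hx1 hrx)
      have e2 : r = ry := reaches_unique hr2 (hpres y ry hy0 hy1 hry)
      refine (hiff x y hx0 hx1 hy0 hy1).1 ⟨rx, hrx, ?_⟩
      rw [show rx = ry by omega]
      exact hry
    · intro hc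
      obtain ⟨r, hr1, hr2⟩ := (hiff x y hx0 hx1 hy0 hy1).2 hc
      exact ⟨r, hpres x r hx0 hx1 hr1, hpres y r hy0 hy1 hr2⟩
  · intro x r hx0 hx1 hr
    obtain ⟨rx, hrx⟩ := hpreach x hx0 hx1
    have he : r = rx := reaches_unique hr (hpres x rx hx0 hx1 hrx)
    rw [he]
    exact hdem x rx hx0 hx1 hrx

-- the two-valued collapse map is injective away from {keep, lose}
lemma collapse_eq_iff (a b keep lose : Int) (_hkl : keep ≠ lose) :
    ((if a = lose then keep else a) = (if b = lose then keep else b)) ↔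
      (a = b ∨ ((a = lose ∨ a = keep) ∧ (b = lose ∨ b = keep))) := by
  by_cases h1 : a = lose <;> by_cases h2 : b = lose <;> simp [h1, h2] <;> omega

-- Coupled is re-established after a merge on both sides
set_option maxHeartbeats 1000000 in
lemma coupled_merge {L : Nat} {p sd comp cd : List Int} (h : Coupled L p sd comp cd)
    {u v ru rv keep lose : Int}
    (hu0 : 0 ≤ u) (hu1 : u < (L : Int)) (hv0 : 0 ≤ v) (hv1 : v < (L : Int))
    (hru : Reaches p u ru) (hrv : Reaches p v rv) (hne : ru ≠ rv)
    (hkl : (keep = ru ∧ lose = rv) ∨ (keep = rv ∧ lose = ru))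
    {p' : List Int} (hlen' : p'.length = L)
    (hrange' : ∀ z : Int, 0 ≤ z → z < (L : Int) → 0 ≤ lget p' z ∧ lget p' z < (L : Int))
    (hpres : ∀ z w : Int, 0 ≤ z → z < (L : Int) → Reaches p z w →
      Reaches p' z (if w = lose then keep else w)) :
    Coupled L p' (lset sd keep (lget sd ru + lget sd rv))
      (comp.map fun c => if c = lget comp v then lget comp u else c)
      (lset cd (lget comp u) (lget cd (lget comp u) + lget cd (lget comp v))) := by
  obtain ⟨⟨hplen, hprange, hpreach⟩, hclen, hcdlen, hsdlen, hcrange, hiff, hdem⟩ := h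
  have hcub := hcrange u hu0 hu1
  have hcvb := hcrange v hv0 hv1
  have hrub := reaches_range hprange hu0 hu1 hru
  have hrvb := reaches_range hprange hv0 hv1 hrv
  have hkb : 0 ≤ keep ∧ keep < (L : Int) := by
    rcases hkl with ⟨h1, _⟩ | ⟨h1, _⟩ <;> subst h1
    · exact hrub
    · exact hrvb
  have hklne : keep ≠ lose := by
    rcases hkl with ⟨h1, h2⟩ | ⟨h1, h2⟩ <;> subst h1 <;> subst h2
    · exact hne
    · exact Ne.symm hne
  have hcune : lget comp u ≠ lget comp v := by
    intro hc
    obtain ⟨r, h1, h2⟩ := (hiff u v hu0 hu1 hv0 hv1).2 hc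
    exact hne (by rw [← reaches_unique h1 hru, ← reaches_unique h2 hrv])
  have hchar_u : ∀ x rx : Int, 0 ≤ x → x < (L : Int) → Reaches p x rx →
      (rx = ru ↔ lget comp x = lget comp u) := by
    intro x rx hx0 hx1 hrx
    constructor
    · intro he
      refine (hiff x u hx0 hx1 hu0 hu1).1 ⟨ru, ?_, hru⟩
      rw [← he]; exact hrx
    · intro hc
      obtain ⟨r, h1, h2⟩ := (hiff x u hx0 hx1 hu0 hu1).2 hc
      rw [reaches_unique hrx h1, reaches_unique h2 hru]
  have hchar_v : ∀ x rx : Int, 0 ≤ x → x < (L : Int) → Reaches p x rx →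
      (rx = rv ↔ lget comp x = lget comp v) := by
    intro x rx hx0 hx1 hrx
    constructor
    · intro he
      refine (hiff x v hx0 hx1 hv0 hv1).1 ⟨rv, ?_, hrv⟩
      rw [← he]; exact hrx
    · intro hc
      obtain ⟨r, h1, h2⟩ := (hiff x v hx0 hx1 hv0 hv1).2 hc
      rw [reaches_unique hrx h1, reaches_unique h2 hrv]
  have hcomp' : ∀ x : Int, 0 ≤ x → x < (L : Int) →
      lget (comp.map fun c => if c = lget comp v then lget comp u else c) x =
        (if lget comp x = lget comp v then lget comp u else lget comp x) := by
    intro x hx0 hx1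
    rw [lget_eq_getElem _ x hx0 (by rw [List.length_map, hclen]; omega),
      List.getElem_map, lget_eq_getElem comp x hx0 (by rw [hclen]; omega)]
  refine ⟨⟨hlen', hrange', ?_⟩, by rw [List.length_map]; exact hclen,
    by rw [length_lset]; exact hcdlen, by rw [length_lset]; omega, ?_, ?_, ?_⟩
  · intro x hx0 hx1
    obtain ⟨r, hr⟩ := hpreach x hx0 hx1
    exact ⟨_, hpres x r hx0 hx1 hr⟩
  · intro x hx0 hx1
    rw [hcomp' x hx0 hx1]
    split
    · exact hcub
    · exact hcrange x hx0 hx1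
  · intro x y hx0 hx1 hy0 hy1
    obtain ⟨rx, hrx⟩ := hpreach x hx0 hx1
    obtain ⟨ry, hry⟩ := hpreach y hy0 hy1
    have hxw := hpres x rx hx0 hx1 hrx
    have hyw := hpres y ry hy0 hy1 hry
    have heq : (∃ r, Reaches p' x r ∧ Reaches p' y r) ↔
        (if rx = lose then keep else rx) = (if ry = lose then keep else ry) := by
      constructor
      · intro hex
        obtain ⟨r, h1, h2⟩ := hex
        rw [← reaches_unique h1 hxw, ← reaches_unique h2 hyw]
      · intro he
        refine ⟨_, hxw, ?_⟩
        rw [he]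
        exact hyw
    have hxy : rx = ry ↔ lget comp x = lget comp y := by
      constructor
      · intro he
        refine (hiff x y hx0 hx1 hy0 hy1).1 ⟨rx, hrx, ?_⟩
        rw [he]; exact hry
      · intro hc
        obtain ⟨r, h1, h2⟩ := (hiff x y hx0 hx1 hy0 hy1).2 hc
        rw [reaches_unique hrx h1, reaches_unique h2 hry]
    have hxu := hchar_u x rx hx0 hx1 hrx
    have hxv := hchar_v x rx hx0 hx1 hrx
    have hyu := hchar_u y ry hy0 hy1 hry
    have hyv := hchar_v y ry hy0 hy1 hry
    have hmem_x : (rx = lose ∨ rx = keep) ↔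
        (lget comp x = lget comp v ∨ lget comp x = lget comp u) := by
      rcases hkl with ⟨h1, h2⟩ | ⟨h1, h2⟩ <;> subst h1 <;> subst h2
      · rw [hxv, hxu]
      · rw [hxu, hxv]; exact or_comm
    have hmem_y : (ry = lose ∨ ry = keep) ↔
        (lget comp y = lget comp v ∨ lget comp y = lget comp u) := by
      rcases hkl with ⟨h1, h2⟩ | ⟨h1, h2⟩ <;> subst h1 <;> subst h2
      · rw [hyv, hyu]
      · rw [hyu, hyv]; exact or_comm
    rw [heq, hcomp' x hx0 hx1, hcomp' y hy0 hy1,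
      collapse_eq_iff rx ry keep lose hklne,
      collapse_eq_iff (lget comp x) (lget comp y) (lget comp u) (lget comp v) hcune,
      hxy, hmem_x, hmem_y]
  · intro x r' hx0 hx1 hr'
    obtain ⟨rx, hrx⟩ := hpreach x hx0 hx1
    have hrxb := reaches_range hprange hx0 hx1 hrx
    have he : r' = (if rx = lose then keep else rx) :=
      reaches_unique hr' (hpres x rx hx0 hx1 hrx)
    have hcomb : lget sd ru + lget sd rv =
        lget cd (lget comp u) + lget cd (lget comp v) := by
      rw [hdem u ru hu0 hu1 hru, hdem v rv hv0 hv1 hrv]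
    rw [hcomp' x hx0 hx1, he]
    by_cases hmerged : rx = ru ∨ rx = rv
    · have hrl : (if rx = lose then keep else rx) = keep := by
        rcases hkl with ⟨h1, h2⟩ | ⟨h1, h2⟩ <;> subst h1 <;> subst h2 <;>
          rcases hmerged with hq | hq <;> subst hq <;> simp [hne, Ne.symm hne]
      have hcx : (if lget comp x = lget comp v then lget comp u else lget comp x) =
          lget comp u := by
        rcases hmerged with hq | hq
        · have hxu := (hchar_u x rx hx0 hx1 hrx).1 hq
          rw [if_neg (by rw [hxu]; exact hcune), hxu]
        · rw [if_pos ((hchar_v x rx hx0 hx1 hrx).1 hq)]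
      rw [hrl, hcx,
        lget_lset_self sd keep _ hkb.1 (by omega),
        lget_lset_self cd (lget comp u) _ hcub.1 (by rw [hcdlen]; omega)]
      exact hcomb
    · rw [not_or] at hmerged
      have hrl : (if rx = lose then keep else rx) = rx := by
        rcases hkl with ⟨h1, h2⟩ | ⟨h1, h2⟩ <;> subst h1 <;> subst h2 <;>
          simp [hmerged.1, hmerged.2]
      have hcx1 : lget comp x ≠ lget comp v :=
        fun hc => hmerged.2 ((hchar_v x rx hx0 hx1 hrx).2 hc)
      have hcx2 : lget comp x ≠ lget comp u :=
        fun hc => hmerged.1 ((hchar_u x rx hx0 hx1 hrx).2 hc)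
      have hrkeep : rx ≠ keep := by
        rcases hkl with ⟨h1, _⟩ | ⟨h1, _⟩ <;> subst h1
        · exact hmerged.1
        · exact hmerged.2
      rw [hrl, if_neg hcx1,
        lget_lset_ne sd keep _ rx hkb.1 (by omega) hrxb.1 (by omega) hrkeep,
        lget_lset_ne cd (lget comp u) _ (lget comp x) hcub.1 (by rw [hcdlen]; omega)
          (hcrange x hx0 hx1).1 (by rw [hcdlen]; exact (hcrange x hx0 hx1).2) hcx2]
      exact hdem x rx hx0 hx1 hrx

-- initial states are coupled
lemma coupled_init (n : Int) (demand : List Int) (hn : 0 ≤ n)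
    (hd : n ≤ (demand.length : Int)) :
    Coupled n.toNat (PySem.List.pyRange 0 n 1) demand (PySem.List.pyRange 0 n 1)
      (PySem.List.slice demand none (some n)) := by
  have hplen : (PySem.List.pyRange 0 n 1).length = n.toNat := by
    rw [PySem.List.length_pyRange_one]; omega
  have hid : ∀ x : Int, 0 ≤ x → x < ((n.toNat : Nat) : Int) →
      lget (PySem.List.pyRange 0 n 1) x = x := by
    intro x hx0 hx1
    rw [lget_eq_getElem _ x hx0 (by rw [hplen]; exact hx1),
      PySem.List.getElem_pyRange_one]
    omega
  have hslice : PySem.List.slice demand none (some n) = demand.take n.toNat :=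
    PySem.List.slice_to demand hn
  have hcdlen : (PySem.List.slice demand none (some n)).length = n.toNat := by
    rw [hslice, List.length_take]; omega
  have hcd : ∀ x : Int, 0 ≤ x → x < ((n.toNat : Nat) : Int) →
      lget (PySem.List.slice demand none (some n)) x = lget demand x := by
    intro x hx0 hx1
    rw [lget_eq_getElem _ x hx0 (by rw [hcdlen]; exact hx1),
      lget_eq_getElem demand x hx0 (by omega)]
    simp only [hslice, List.getElem_take]
  have hreach : ∀ x r : Int, 0 ≤ x → x < ((n.toNat : Nat) : Int) →
      Reaches (PySem.List.pyRange 0 n 1) x r → r = x := by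
    intro x r hx0 hx1 hr
    exact reaches_unique hr ⟨0, rfl, hid x hx0 hx1⟩
  refine ⟨⟨hplen, ?_, ?_⟩, hplen, hcdlen, by omega, ?_, ?_, ?_⟩
  · intro x hx0 hx1
    rw [hid x hx0 hx1]; exact ⟨hx0, hx1⟩
  · intro x hx0 hx1
    exact ⟨x, 0, rfl, hid x hx0 hx1⟩
  · intro x hx0 hx1
    rw [hid x hx0 hx1]; exact ⟨hx0, hx1⟩
  · intro x y hx0 hx1 hy0 hy1
    rw [hid x hx0 hx1, hid y hy0 hy1]
    constructor
    · intro hex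
      obtain ⟨r, h1, h2⟩ := hex
      rw [← hreach x r hx0 hx1 h1, ← hreach y r hy0 hy1 h2]
    · intro he
      refine ⟨x, ⟨0, rfl, hid x hx0 hx1⟩, ⟨0, ?_, ?_⟩⟩
      · show y = x; omega
      · rw [hid x hx0 hx1]
  · intro x r hx0 hx1 hr
    rw [hreach x r hx0 hx1 hr, hid x hx0 hx1, hcd x hx0 hx1]

-- A's loop agrees with the label loop under the coupling invariant
set_option maxHeartbeats 2000000 in
lemma loop_eq (n : Int) (caps : List Int) (L : Nat) (hLn : (L : Int) = n) :
    ∀ (es : List (List Int)) (p rank sd comp cd : List Int) (tc : Int) (mst : List (Int × Int)),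
    (∀ e ∈ es, e.length = 3 ∧ ∀ x ∈ e.take 2, 0 ≤ x ∧ x < n) →
    Coupled L p sd comp cd →
    aLoop n caps es p rank sd tc mst = midLoop n caps es comp cd tc mst := by
  intro es
  induction es with
  | nil => intro p rank sd comp cd tc mst _ _; rfl
  | cons e rest ih =>
    intro p rank sd comp cd tc mst hes hc
    obtain ⟨he3, hebd⟩ := hes e (by simp)
    obtain ⟨u, v, c, rfl⟩ : ∃ u v c, e = [u, v, c] := by
      rcases e with _ | ⟨u, e⟩
      · simp at he3
      rcases e with _ | ⟨v, e⟩
      · simp at he3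
      rcases e with _ | ⟨c, e⟩
      · simp at he3
      rcases e with _ | ⟨d, e⟩
      · exact ⟨u, v, c, rfl⟩
      · simp at he3
    have hu := hebd u (by simp)
    have hv := hebd v (by simp)
    have hrest : ∀ e' ∈ rest, e'.length = 3 ∧ ∀ x ∈ e'.take 2, 0 ≤ x ∧ x < n :=
      fun e' he' => hes e' (by simp [he'])
    have hgu : lget [u, v, c] 0 = u := by
      rw [lget_eq_getElem _ 0 (by omega) (by simp)]; rfl
    have hgv : lget [u, v, c] 1 = v := by
      rw [lget_eq_getElem _ 1 (by omega) (by simp)]; rfl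
    have hgc : lget [u, v, c] 2 = c := by
      rw [lget_eq_getElem _ 2 (by omega) (by simp)]; rfl
    have hu0 : 0 ≤ u := hu.1
    have hu1 : u < (L : Int) := by omega
    have hv0 : 0 ≤ v := hv.1
    have hv1 : v < (L : Int) := by omega
    obtain ⟨⟨hplen, hprange, hpreach⟩, hclen, hcdlen, hsdlen, hcrange, hiff, hdem⟩ := hc
    have hcoup : Coupled L p sd comp cd :=
      ⟨⟨hplen, hprange, hpreach⟩, hclen, hcdlen, hsdlen, hcrange, hiff, hdem⟩
    obtain ⟨ru, hru⟩ := hpreach u hu0 hu1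
    obtain ⟨rv, hrv⟩ := hpreach v hv0 hv1
    -- find #1 on u
    obtain ⟨k1, hk1, e1, f1⟩ := reaches_fuel hprange hu0 hu1 hru
    obtain ⟨v1, l1, r1, pr1⟩ := find_spec p hplen hprange p.length u ru hu0 hu1
      ⟨k1, by omega, e1, f1⟩
    set p1 := (ufFind p.length p u).1 with hp1
    -- find #2 on v
    have hrv1 : Reaches p1 v rv := pr1 v rv hv0 hv1 hrv
    obtain ⟨k2, hk2, e2, f2⟩ := reaches_fuel r1 hv0 hv1 hrv1
    obtain ⟨v2, l2, r2, pr2⟩ := find_spec p1 l1 r1 p1.length v rv hv0 hv1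
      ⟨k2, by rw [l1]; omega, e2, f2⟩
    set p2 := (ufFind p1.length p1 v).1 with hp2
    have hcoup2 : Coupled L p2 sd comp cd :=
      coupled_transfer (coupled_transfer hcoup l1 r1 pr1) l2 r2 pr2
    -- guard equivalence
    have hguard : ru = rv ↔ lget comp u = lget comp v := by
      constructor
      · intro he
        refine (hiff u v hu0 hu1 hv0 hv1).1 ⟨ru, hru, ?_⟩
        rw [he]; exact hrv
      · intro hc'
        obtain ⟨r, h1', h2'⟩ := (hiff u v hu0 hu1 hv0 hv1).2 hc'
        rw [reaches_unique hru h1', reaches_unique h2' hrv]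
    show aLoop n caps ([u,v,c] :: rest) p rank sd tc mst =
      midLoop n caps ([u,v,c] :: rest) comp cd tc mst
    simp only [aLoop, midLoop, hgu, hgv, hgc, ← hp1, v1, ← hp2, v2]
    by_cases hne : ru = rv
    · -- same component: both skip
      rw [if_neg (by simpa using hne), if_pos (hguard.1 hne)]
      exact ih p2 rank sd comp cd tc mst hrest hcoup2
    · rw [if_pos (by simpa using hne), if_neg (fun hc' => hne (hguard.2 hc'))]
      -- find #3 on u, find #4 on v
      have hru2 : Reaches p2 u ru := pr2 u ru hu0 hu1 (pr1 u ru hu0 hu1 hru)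
      obtain ⟨k3, hk3, e3, f3⟩ := reaches_fuel r2 hu0 hu1 hru2
      obtain ⟨v3, l3, r3, pr3⟩ := find_spec p2 l2 r2 p2.length u ru hu0 hu1
        ⟨k3, by rw [l2]; omega, e3, f3⟩
      set p3 := (ufFind p2.length p2 u).1 with hp3
      have hrv3 : Reaches p3 v rv := pr3 v rv hv0 hv1 (pr2 v rv hv0 hv1 hrv1)
      obtain ⟨k4, hk4, e4, f4⟩ := reaches_fuel r3 hv0 hv1 hrv3
      obtain ⟨v4, l4, r4, pr4⟩ := find_spec p3 l3 r3 p3.length v rv hv0 hv1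
        ⟨k4, by rw [l3]; omega, e4, f4⟩
      set p4 := (ufFind p3.length p3 v).1 with hp4
      have hcoup4 : Coupled L p4 sd comp cd :=
        coupled_transfer (coupled_transfer hcoup2 l3 r3 pr3) l4 r4 pr4
      simp only [v3, v4]
      -- demands agree
      have hcombined : lget sd ru + lget sd rv =
          lget cd (lget comp u) + lget cd (lget comp v) := by
        rw [hdem u ru hu0 hu1 hru, hdem v rv hv0 hv1 hrv]
      by_cases hcap : lget sd ru + lget sd rv ≤ min (lget caps u) (lget caps v)
      · have hcapB : ¬ (min (lget caps u) (lget caps v) <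
            lget cd (lget comp u) + lget cd (lget comp v)) := by
          rw [← hcombined]; omega
        rw [if_pos hcap, if_neg hcapB]
        -- union
        have hru4 : Reaches p4 u ru := pr4 u ru hu0 hu1 (pr3 u ru hu0 hu1 hru2)
        have hrv4 : Reaches p4 v rv := pr4 v rv hv0 hv1 hrv3
        obtain ⟨keep, lose, hkl, hok, lU, rU, prU⟩ :=
          union_spec p4 rank l4 r4 u v ru rv hu0 hu1 hv0 hv1 hru4 hrv4 hne
        set p5 := (ufUnion p4 rank u v).1 with hp5
        rw [hok, if_pos rfl]
        -- find #5 on u: its root is keep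
        have hru5 : Reaches p5 u keep := by
          have hq := prU u ru hu0 hu1 hru4
          rcases hkl with ⟨h1, h2⟩ | ⟨h1, h2⟩ <;> subst h1 <;> subst h2
          · rwa [if_neg hne] at hq
          · rwa [if_pos rfl] at hq
        obtain ⟨k5, hk5, e5, f5⟩ := reaches_fuel rU hu0 hu1 hru5
        obtain ⟨v5, l5, r5, pr5⟩ := find_spec p5 lU rU p5.length u keep hu0 hu1
          ⟨k5, by rw [lU]; omega, e5, f5⟩
        set p6 := (ufFind p5.length p5 u).1 with hp6
        simp only [v5]
        by_cases hbreak : ((mst ++ [(u, v)]).length : Int) = n - 1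
        · rw [if_pos hbreak, if_pos hbreak]
        · rw [if_neg hbreak, if_neg hbreak]
          have hpres56 : ∀ z w : Int, 0 ≤ z → z < (L : Int) → Reaches p4 z w →
              Reaches p6 z (if w = lose then keep else w) := by
            intro z w hz0 hz1 hzw
            exact pr5 z _ hz0 hz1 (prU z w hz0 hz1 hzw)
          have hcoup6 := coupled_merge hcoup4 hu0 hu1 hv0 hv1 hru4 hrv4 hne hkl l5 r5 hpres56
          exact ih p6 _ _ _ _ (tc + c) (mst ++ [(u, v)]) hrest hcoup6
      · have hcapB : min (lget caps u) (lget caps v) <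
            lget cd (lget comp u) + lget cd (lget comp v) := by
          rw [← hcombined]; omega
        rw [if_neg hcap, if_pos hcapB]
        exact ih p4 rank sd comp cd tc mst hrest hcoup4

-- ===== layer 2: the label loop equals B's closure loop =====

-- connectivity over the accepted-edge list
def EStep (mst : List (Int × Int)) (a b : Int) : Prop := (a, b) ∈ mst ∨ (b, a) ∈ mst
def Conn (mst : List (Int × Int)) : Int → Int → Prop := Relation.ReflTransGen (EStep mst)

lemma conn_refl (mst : List (Int × Int)) (x : Int) : Conn mst x x := Relation.ReflTransGen.refl

lemma estep_symm {mst : List (Int × Int)} : Symmetric (EStep mst) :=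
  fun _ _ h => h.elim Or.inr Or.inl

lemma conn_symm {mst : List (Int × Int)} {x y : Int} (h : Conn mst x y) : Conn mst y x :=
  (Relation.ReflTransGen.symmetric estep_symm) h

lemma conn_trans {mst : List (Int × Int)} {x y z : Int} (h1 : Conn mst x y)
    (h2 : Conn mst y z) : Conn mst x z := Relation.ReflTransGen.trans h1 h2

lemma conn_single {mst : List (Int × Int)} {x y : Int} (h : EStep mst x y) : Conn mst x y :=
  Relation.ReflTransGen.single h

lemma conn_mono {mst mst' : List (Int × Int)} (hsub : ∀ e ∈ mst, e ∈ mst') {x y : Int}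
    (h : Conn mst x y) : Conn mst' x y :=
  Relation.ReflTransGen.mono (fun _ _ hs => hs.elim (fun q => Or.inl (hsub _ q)) (fun q => Or.inr (hsub _ q))) h

lemma conn_nil {x y : Int} (h : Conn [] x y) : x = y := by
  induction h with
  | refl => rfl
  | tail _ hstep ih => rcases hstep with h' | h' <;> simp at h'

-- adding one edge (u,v) to the accepted list joins exactly the two classes
lemma conn_snoc {mst : List (Int × Int)} {u v x y : Int} :
    Conn (mst ++ [(u, v)]) x y ↔
      Conn mst x y ∨ (Conn mst x u ∧ Conn mst y v) ∨ (Conn mst x v ∧ Conn mst y u) := by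
  constructor
  · intro h
    induction h with
    | refl => exact Or.inl (conn_refl _ _)
    | @tail b c _ hstep ih =>
      have hbc : EStep mst b c ∨ (b = u ∧ c = v) ∨ (b = v ∧ c = u) := by
        rcases hstep with h' | h'
        · rw [List.mem_append] at h'
          rcases h' with h' | h'
          · exact Or.inl (Or.inl h')
          · simp at h'
            exact Or.inr (Or.inl ⟨h'.1, h'.2⟩)
        · rw [List.mem_append] at h'
          rcases h' with h' | h'
          · exact Or.inl (Or.inr h')
          · simp at h'
            exact Or.inr (Or.inr ⟨h'.2, h'.1⟩)
      rcases hbc with hs | ⟨rfl, rfl⟩ | ⟨rfl, rfl⟩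
      · rcases ih with h1 | ⟨h1, h2⟩ | ⟨h1, h2⟩
        · exact Or.inl (conn_trans h1 (conn_single hs))
        · exact Or.inr (Or.inl ⟨h1, conn_trans (conn_symm (conn_single hs)) h2⟩)
        · exact Or.inr (Or.inr ⟨h1, conn_trans (conn_symm (conn_single hs)) h2⟩)
      · rcases ih with h1 | ⟨h1, h2⟩ | ⟨h1, h2⟩
        · exact Or.inr (Or.inl ⟨h1, conn_refl _ _⟩)
        · exact Or.inl (conn_trans h1 h2)
        · exact Or.inl h1
      · rcases ih with h1 | ⟨h1, h2⟩ | ⟨h1, h2⟩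
        · exact Or.inr (Or.inr ⟨h1, conn_refl _ _⟩)
        · exact Or.inl h1
        · exact Or.inl (conn_trans h1 h2)
  · intro h
    have hsub : ∀ e ∈ mst, e ∈ mst ++ [(u, v)] := fun e he => by simp [he]
    have hnew : Conn (mst ++ [(u, v)]) u v := conn_single (Or.inl (by simp))
    rcases h with h1 | ⟨h1, h2⟩ | ⟨h1, h2⟩
    · exact conn_mono hsub h1
    · exact conn_trans (conn_mono hsub h1)
        (conn_trans hnew (conn_symm (conn_mono hsub h2)))
    · exact conn_trans (conn_mono hsub h1)
        (conn_trans (conn_symm hnew) (conn_symm (conn_mono hsub h2)))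

-- ----- bStep facts -----

lemma bStep_mem_mono : ∀ (mst : List (Int × Int)) (comp : PySem.Set Int) (ch : Bool)
    {x : Int}, x ∈ comp → x ∈ (bStep mst comp ch).1 := by
  intro mst
  induction mst with
  | nil => intro comp ch x hx; exact hx
  | cons e rest ih =>
    intro comp ch x hx
    obtain ⟨a, b⟩ := e
    simp only [bStep]
    split
    · exact ih _ _ (by rw [PySem.Set.mem_add, PySem.Set.mem_add]; exact Or.inl (Or.inl hx))
    · exact ih _ _ hx

lemma bStep_sub : ∀ (mst : List (Int × Int)) (comp : PySem.Set Int) (ch : Bool)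
    {x : Int}, x ∈ (bStep mst comp ch).1 → x ∈ comp ∨ ∃ p ∈ mst, x = p.1 ∨ x = p.2 := by
  intro mst
  induction mst with
  | nil => intro comp ch x hx; exact Or.inl hx
  | cons e rest ih =>
    intro comp ch x hx
    obtain ⟨a, b⟩ := e
    simp only [bStep] at hx
    split at hx
    · rcases ih _ _ hx with h | ⟨p, hp1, hp2⟩
      · rw [PySem.Set.mem_add, PySem.Set.mem_add] at h
        rcases h with (h | h) | h
        · exact Or.inl h
        · exact Or.inr ⟨(a, b), by simp, Or.inl h⟩
        · exact Or.inr ⟨(a, b), by simp, Or.inr h⟩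
      · exact Or.inr ⟨p, by simp [hp1], hp2⟩
    · rcases ih _ _ hx with h | ⟨p, hp1, hp2⟩
      · exact Or.inl h
      · exact Or.inr ⟨p, by simp [hp1], hp2⟩

lemma bStep_nodup : ∀ (mst : List (Int × Int)) (comp : PySem.Set Int) (ch : Bool),
    comp.Nodup → (bStep mst comp ch).1.Nodup := by
  intro mst
  induction mst with
  | nil => intro comp ch h; exact h
  | cons e rest ih =>
    intro comp ch h
    obtain ⟨a, b⟩ := e
    simp only [bStep]
    split
    · exact ih _ _ (PySem.Set.nodup_add _ _ (PySem.Set.nodup_add _ _ h))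
    · exact ih _ _ h

lemma bStep_flag_true : ∀ (mst : List (Int × Int)) (comp : PySem.Set Int),
    (bStep mst comp true).2 = true := by
  intro mst
  induction mst with
  | nil => intro comp; rfl
  | cons e rest ih =>
    intro comp
    obtain ⟨a, b⟩ := e
    simp only [bStep]
    split
    · exact ih _
    · exact ih _

lemma bStep_conn {M : List (Int × Int)} {u : Int} :
    ∀ (mst : List (Int × Int)) (comp : PySem.Set Int) (ch : Bool),
    (∀ e ∈ mst, e ∈ M) → (∀ x ∈ comp, Conn M u x) →
    ∀ x ∈ (bStep mst comp ch).1, Conn M u x := by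
  intro mst
  induction mst with
  | nil => intro comp ch _ hcomp x hx; exact hcomp x hx
  | cons e rest ih =>
    intro comp ch hsub hcomp x hx
    obtain ⟨a, b⟩ := e
    have habM : (a, b) ∈ M := hsub (a, b) (by simp)
    simp only [bStep] at hx
    split at hx
    · rename_i hcr
      -- one of a, b is already in comp
      have hone : a ∈ comp ∨ b ∈ comp := by
        by_contra hno
        simp only [not_or] at hno
        have ha' : PySem.Set.contains comp a = false := by
          rcases hq : PySem.Set.contains comp a with _ | _
          · rfl
          · exact absurd (PySem.Set.contains_iff _ _ |>.1 hq) hno.1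
        have hb' : PySem.Set.contains comp b = false := by
          rcases hq : PySem.Set.contains comp b with _ | _
          · rfl
          · exact absurd (PySem.Set.contains_iff _ _ |>.1 hq) hno.2
        rw [ha', hb'] at hcr
        simp at hcr
      have hca : Conn M u a := by
        rcases hone with h | h
        · exact hcomp a h
        · exact conn_trans (hcomp b h) (conn_single (Or.inr habM))
      have hcb : Conn M u b := conn_trans hca (conn_single (Or.inl habM))
      refine ih _ _ (fun e' he' => hsub e' (by simp [he'])) ?_ x hx
      intro z hz
      rw [PySem.Set.mem_add, PySem.Set.mem_add] at hz
      rcases hz with (hz | rfl) | rfl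
      · exact hcomp z hz
      · exact hca
      · exact hcb
    · exact ih _ _ (fun e' he' => hsub e' (by simp [he'])) hcomp x hx

lemma bStep_false : ∀ (mst : List (Int × Int)) (comp : PySem.Set Int),
    (bStep mst comp false).2 = false →
    (bStep mst comp false).1 = comp ∧ ∀ p ∈ mst, (p.1 ∈ comp ↔ p.2 ∈ comp) := by
  intro mst
  induction mst with
  | nil => intro comp _; exact ⟨rfl, by simp⟩
  | cons e rest ih =>
    intro comp hf
    obtain ⟨a, b⟩ := e
    by_cases hcr : (PySem.Set.contains comp a != PySem.Set.contains comp b) = true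
    · have hred : bStep ((a, b) :: rest) comp false =
          bStep rest (PySem.Set.add (PySem.Set.add comp a) b) true := by
        simp only [bStep]; rw [if_pos hcr]
      rw [hred, bStep_flag_true] at hf
      exact absurd hf (by simp)
    · have hred : bStep ((a, b) :: rest) comp false = bStep rest comp false := by
        simp only [bStep]; rw [if_neg hcr]
      rw [hred] at hf ⊢
      obtain ⟨h1, h2⟩ := ih comp hf
      refine ⟨h1, ?_⟩
      intro p hp
      rcases List.mem_cons.1 hp with rfl | hp'
      · have hab : PySem.Set.contains comp a = PySem.Set.contains comp b := by
          by_contra hne'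
          exact hcr (bne_iff_ne.2 hne')
        constructor
        · intro ha
          refine (PySem.Set.contains_iff comp b).1 ?_
          rw [← hab]
          exact (PySem.Set.contains_iff comp a).2 ha
        · intro hb
          refine (PySem.Set.contains_iff comp a).1 ?_
          rw [hab]
          exact (PySem.Set.contains_iff comp b).2 hb
      · exact h2 p hp'

lemma bStep_progress : ∀ (mst : List (Int × Int)) (comp : PySem.Set Int),
    (bStep mst comp false).2 = true →
    ∃ x, x ∈ (bStep mst comp false).1 ∧ x ∉ comp := by
  intro mst
  induction mst with
  | nil => intro comp h; simp [bStep] at h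
  | cons e rest ih =>
    intro comp hf
    obtain ⟨a, b⟩ := e
    simp only [bStep] at hf ⊢
    split
    · rename_i hcr
      -- one of a, b is not in comp
      have hone : a ∉ comp ∨ b ∉ comp := by
        by_contra hno
        simp only [not_or, not_not] at hno
        rw [(PySem.Set.contains_iff comp a).2 hno.1, (PySem.Set.contains_iff comp b).2 hno.2] at hcr
        simp at hcr
      rcases hone with h | h
      · refine ⟨a, ?_, h⟩
        exact bStep_mem_mono _ _ _ (by rw [PySem.Set.mem_add, PySem.Set.mem_add]; exact Or.inl (Or.inr rfl))
      · refine ⟨b, ?_, h⟩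
        exact bStep_mem_mono _ _ _ (by rw [PySem.Set.mem_add]; exact Or.inr rfl)
    · rename_i hcr
      rw [if_neg hcr] at hf
      exact ih comp hf

-- ----- bClosure facts -----

lemma bClosure_mem_mono : ∀ (fuel : Nat) (mst : List (Int × Int)) (comp : PySem.Set Int)
    {x : Int}, x ∈ comp → x ∈ bClosure fuel mst comp := by
  intro fuel
  induction fuel with
  | zero => intro mst comp x hx; exact hx
  | succ fuel ih =>
    intro mst comp x hx
    simp only [bClosure]
    split
    · exact ih _ _ (bStep_mem_mono _ _ _ hx)
    · exact bStep_mem_mono _ _ _ hx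

lemma bClosure_nodup : ∀ (fuel : Nat) (mst : List (Int × Int)) (comp : PySem.Set Int),
    comp.Nodup → (bClosure fuel mst comp).Nodup := by
  intro fuel
  induction fuel with
  | zero => intro mst comp h; exact h
  | succ fuel ih =>
    intro mst comp h
    simp only [bClosure]
    split
    · exact ih _ _ (bStep_nodup _ _ _ h)
    · exact bStep_nodup _ _ _ h

lemma bClosure_conn {u : Int} : ∀ (fuel : Nat) (mst : List (Int × Int)) (comp : PySem.Set Int),
    (∀ x ∈ comp, Conn mst u x) → ∀ x ∈ bClosure fuel mst comp, Conn mst u x := by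
  intro fuel
  induction fuel with
  | zero => intro mst comp h x hx; exact h x hx
  | succ fuel ih =>
    intro mst comp h x hx
    simp only [bClosure] at hx
    split at hx
    · exact ih _ _ (bStep_conn _ _ _ (fun e he => he) h) x hx
    · exact bStep_conn _ _ _ (fun e he => he) h x hx

-- with enough fuel the result is closed under the accepted edges
lemma bClosure_closed (mst : List (Int × Int)) (V : List Int)
    (hV : ∀ p ∈ mst, p.1 ∈ V ∧ p.2 ∈ V) :
    ∀ (fuel : Nat) (comp : PySem.Set Int), comp.Nodup → (∀ x ∈ comp, x ∈ V) →
    V.toFinset.card ≤ comp.length + fuel →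
    ∀ p ∈ mst, (p.1 ∈ bClosure fuel mst comp ↔ p.2 ∈ bClosure fuel mst comp) := by
  intro fuel
  induction fuel with
  | zero =>
    intro comp hnd hsub hcard p hp
    -- comp already contains every member of V, in particular both endpoints
    have hsubF : comp.toFinset ⊆ V.toFinset := by
      intro a ha
      rw [List.mem_toFinset] at ha ⊢
      exact hsub a ha
    have hcc : comp.toFinset.card = comp.length := List.toFinset_card_of_nodup hnd
    have heqF : comp.toFinset = V.toFinset :=
      Finset.eq_of_subset_of_card_le hsubF (by omega)
    have hallin : ∀ x ∈ V, x ∈ comp := by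
      intro x hx
      have : x ∈ comp.toFinset := by rw [heqF, List.mem_toFinset]; exact hx
      rwa [List.mem_toFinset] at this
    simp only [bClosure]
    exact ⟨fun _ => hallin _ (hV p hp).2, fun _ => hallin _ (hV p hp).1⟩
  | succ fuel ih =>
    intro comp hnd hsub hcard p hp
    simp only [bClosure]
    split
    · rename_i hflag
      -- the pass changed something: comp grew strictly
      obtain ⟨x, hx1, hx2⟩ := bStep_progress mst comp hflag
      have hmono : ∀ z ∈ comp, z ∈ (bStep mst comp false).1 :=
        fun z hz => bStep_mem_mono _ _ _ hz
      have hnd' : (bStep mst comp false).1.Nodup := bStep_nodup _ _ _ hnd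
      have hsub' : ∀ z ∈ (bStep mst comp false).1, z ∈ V := by
        intro z hz
        rcases bStep_sub _ _ _ hz with h | ⟨q, hq1, hq2⟩
        · exact hsub z h
        · rcases hq2 with rfl | rfl
          · exact (hV q hq1).1
          · exact (hV q hq1).2
      have hlt : comp.length < (bStep mst comp false).1.length := by
        have h1 : comp.toFinset ⊆ (bStep mst comp false).1.toFinset := by
          intro a ha
          rw [List.mem_toFinset] at ha ⊢
          exact hmono a ha
        have h2 : comp.toFinset.card < (bStep mst comp false).1.toFinset.card := by
          apply Finset.card_lt_card
          rw [Finset.ssubset_iff_of_subset h1]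
          exact ⟨x, by rw [List.mem_toFinset]; exact hx1, by rw [List.mem_toFinset]; exact hx2⟩
        rw [List.toFinset_card_of_nodup hnd, List.toFinset_card_of_nodup hnd'] at h2
        exact h2
      exact ih _ hnd' hsub' (by omega) p hp
    · rename_i hflag
      -- fixpoint: the pass left comp unchanged and every edge is non-crossing
      have hflag' : (bStep mst comp false).2 = false := by
        rcases hq : (bStep mst comp false).2 with _ | _
        · rfl
        · exact absurd hq hflag
      obtain ⟨h1, h2⟩ := bStep_false mst comp hflag'
      rw [h1]
      exact h2 p hp

-- the component closure computes exactly the connectivity class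
lemma mem_bComponent {mst : List (Int × Int)} {u x : Int} :
    x ∈ bComponent mst u ↔ Conn mst u x := by
  constructor
  · intro hx
    refine bClosure_conn _ _ _ ?_ x hx
    intro z hz
    rw [PySem.Set.mem_ofList] at hz
    simp at hz
    rw [hz]
    exact conn_refl _ _
  · intro h
    -- completeness: the result is closed under every accepted edge
    have hclosed := bClosure_closed mst (u :: mst.flatMap (fun p => [p.1, p.2]))
      (by
        intro p hp
        constructor
        · exact List.mem_cons_of_mem _ (List.mem_flatMap.2 ⟨p, hp, by simp⟩)
        · exact List.mem_cons_of_mem _ (List.mem_flatMap.2 ⟨p, hp, by simp⟩))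
      (2 * mst.length + 2) (PySem.Set.ofList [u])
      (PySem.Set.nodup_ofList _)
      (by
        intro z hz
        rw [PySem.Set.mem_ofList] at hz
        simp at hz
        simp [hz])
      (by
        have hlen : (mst.flatMap (fun p => [p.1, p.2])).length = 2 * mst.length := by
          clear h
          induction mst with
          | nil => rfl
          | cons q qs ihq =>
            rw [List.flatMap_cons, List.length_append, ihq, List.length_cons]
            simp only [List.length_cons, List.length_nil]
            omega
        have hcle := (u :: mst.flatMap (fun p => [p.1, p.2])).toFinset_card_le
        have hl1 : (PySem.Set.ofList [u] : List Int).length = 1 := rfl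
        simp only [List.length_cons, hlen] at hcle
        omega)
    have hu : u ∈ bComponent mst u :=
      bClosure_mem_mono _ _ _ (by rw [PySem.Set.mem_ofList]; simp)
    induction h with
    | refl => exact hu
    | @tail b c _ hstep ih =>
      rcases hstep with hs | hs
      · exact (hclosed (b, c) hs).1 ih
      · exact (hclosed (c, b) hs).2 ih

-- nodes connected to a node of [0,L) stay in [0,L) when all accepted edges do
lemma conn_range {L : Nat} {mst : List (Int × Int)}
    (hE : ∀ p ∈ mst, (0 ≤ p.1 ∧ p.1 < (L : Int)) ∧ (0 ≤ p.2 ∧ p.2 < (L : Int)))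
    {u x : Int} (hu : 0 ≤ u ∧ u < (L : Int)) (h : Conn mst u x) : 0 ≤ x ∧ x < (L : Int) := by
  induction h with
  | refl => exact hu
  | tail _ hstep ih =>
    rcases hstep with hs | hs
    · exact (hE _ hs).2
    · exact (hE _ hs).1

-- the sum of original demands over one label class of [0,n)
def classSum (L : Nat) (comp dem : List Int) (c : Int) : Int :=
  (((PySem.List.pyRange 0 (L : Int) 1).filter (fun y => lget comp y == c)).map
    (fun y => lget dem y)).sum

-- the coupling invariant between the label state (comp, cd) and B's accepted-edge list
def MCoup (L : Nat) (comp cd dem : List Int) (mst : List (Int × Int)) : Prop :=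
  comp.length = L ∧ cd.length = L ∧
  (∀ x : Int, 0 ≤ x → x < (L : Int) → 0 ≤ lget comp x ∧ lget comp x < (L : Int)) ∧
  (∀ p ∈ mst, (0 ≤ p.1 ∧ p.1 < (L : Int)) ∧ (0 ≤ p.2 ∧ p.2 < (L : Int))) ∧
  (∀ x y : Int, 0 ≤ x → x < (L : Int) → 0 ≤ y → y < (L : Int) →
    (lget comp x = lget comp y ↔ Conn mst x y)) ∧
  (∀ x : Int, 0 ≤ x → x < (L : Int) → lget cd (lget comp x) = classSum L comp dem (lget comp x))

-- sum of a map over a filter by a disjunction of disjoint tests splits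
lemma sum_map_filter_or (p q : Int → Bool) (f : Int → Int) :
    ∀ l : List Int, (∀ a ∈ l, ¬(p a = true ∧ q a = true)) →
    ((l.filter (fun a => p a || q a)).map f).sum = ((l.filter p).map f).sum + ((l.filter q).map f).sum := by
  intro l
  induction l with
  | nil => simp
  | cons a l ih =>
    intro hd
    have hda := hd a (by simp)
    have ihl := ih (fun b hb => hd b (by simp [hb]))
    by_cases hp : p a <;> by_cases hq : q a <;> simp_all <;> omega

-- B's per-component demand sum equals the label state's cached class demand
lemma component_sum {L : Nat} {comp cd dem : List Int} {mst : List (Int × Int)}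
    (h : MCoup L comp cd dem mst) {u : Int} (hu0 : 0 ≤ u) (hu1 : u < (L : Int)) :
    ((bComponent mst u).map (fun x => lget dem x)).sum = lget cd (lget comp u) := by
  obtain ⟨hclen, hcdlen, hcrange, hE, hiff, hsum⟩ := h
  have hmem : ∀ x : Int, x ∈ bComponent mst u ↔
      x ∈ (PySem.List.pyRange 0 (L : Int) 1).filter (fun y => lget comp y == lget comp u) := by
    intro x
    rw [mem_bComponent, List.mem_filter, PySem.List.mem_pyRange_one]
    constructor
    · intro hc
      have hxr := conn_range hE ⟨hu0, hu1⟩ hc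
      refine ⟨⟨hxr.1, hxr.2⟩, ?_⟩
      rw [beq_iff_eq]
      exact (hiff x u hxr.1 hxr.2 hu0 hu1).2 (conn_symm hc)
    · intro ⟨hxr, hcx⟩
      rw [beq_iff_eq] at hcx
      exact conn_symm ((hiff x u hxr.1 hxr.2 hu0 hu1).1 hcx)
  have hnd1 : (bComponent mst u).Nodup := bClosure_nodup _ _ _ (PySem.Set.nodup_ofList _)
  have hnd2 : ((PySem.List.pyRange 0 (L : Int) 1).filter
      (fun y => lget comp y == lget comp u)).Nodup :=
    (PySem.List.nodup_pyRange_one 0 (L : Int)).filter _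
  have hperm : (bComponent mst u).Perm
      ((PySem.List.pyRange 0 (L : Int) 1).filter (fun y => lget comp y == lget comp u)) :=
    (List.perm_ext_iff_of_nodup hnd1 hnd2).2 hmem
  rw [(hperm.map (fun x => lget dem x)).sum_eq, hsum u hu0 hu1, classSum]

-- the invariant holds initially
lemma mcoup_init (n : Int) (demand : List Int) (hn : 0 ≤ n) (hd : n ≤ (demand.length : Int)) :
    MCoup n.toNat (PySem.List.pyRange 0 n 1) (PySem.List.slice demand none (some n)) demand [] := by
  have hplen : (PySem.List.pyRange 0 n 1).length = n.toNat := by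
    rw [PySem.List.length_pyRange_one]; omega
  have hid : ∀ x : Int, 0 ≤ x → x < ((n.toNat : Nat) : Int) →
      lget (PySem.List.pyRange 0 n 1) x = x := by
    intro x hx0 hx1
    rw [lget_eq_getElem _ x hx0 (by rw [hplen]; exact hx1),
      PySem.List.getElem_pyRange_one]
    omega
  have hslice : PySem.List.slice demand none (some n) = demand.take n.toNat :=
    PySem.List.slice_to demand hn
  have hcdlen : (PySem.List.slice demand none (some n)).length = n.toNat := by
    rw [hslice, List.length_take]; omega
  have hcd : ∀ x : Int, 0 ≤ x → x < ((n.toNat : Nat) : Int) →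
      lget (PySem.List.slice demand none (some n)) x = lget demand x := by
    intro x hx0 hx1
    rw [lget_eq_getElem _ x hx0 (by rw [hcdlen]; exact hx1),
      lget_eq_getElem demand x hx0 (by omega)]
    simp only [hslice, List.getElem_take]
  have hLn : ((n.toNat : Nat) : Int) = n := by omega
  refine ⟨hplen, hcdlen, ?_, by simp, ?_, ?_⟩
  · intro x hx0 hx1
    rw [hid x hx0 hx1]; exact ⟨hx0, hx1⟩
  · intro x y hx0 hx1 hy0 hy1
    rw [hid x hx0 hx1, hid y hy0 hy1]
    constructor
    · intro he; rw [he]; exact conn_refl _ _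
    · intro hc; exact (conn_nil hc)
  · intro x hx0 hx1
    rw [hid x hx0 hx1, hcd x hx0 hx1, classSum]
    have hfe : (PySem.List.pyRange 0 ((n.toNat : Nat) : Int) 1).filter
        (fun y => lget (PySem.List.pyRange 0 n 1) y == x) =
        (PySem.List.pyRange 0 ((n.toNat : Nat) : Int) 1).filter (fun y => y == x) := by
      apply List.filter_congr
      intro y hy
      rw [PySem.List.mem_pyRange_one] at hy
      rw [hid y hy.1 (by omega)]
    rw [hfe]
    have hxmem : x ∈ PySem.List.pyRange 0 ((n.toNat : Nat) : Int) 1 := by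
      rw [PySem.List.mem_pyRange_one]; exact ⟨hx0, hx1⟩
    have hnd : (PySem.List.pyRange 0 ((n.toNat : Nat) : Int) 1).Nodup :=
      PySem.List.nodup_pyRange_one 0 _
    have hcount : (PySem.List.pyRange 0 ((n.toNat : Nat) : Int) 1).count x = 1 :=
      List.count_eq_one_of_mem hnd hxmem
    rw [List.filter_beq, hcount]
    simp

-- lget of the relabelled array
lemma lget_map_relabel {L : Nat} {comp : List Int} (hclen : comp.length = L) (cu cv : Int)
    {x : Int} (hx0 : 0 ≤ x) (hx1 : x < (L : Int)) :
    lget (comp.map fun c => if c = cv then cu else c) x =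
      (if lget comp x = cv then cu else lget comp x) := by
  rw [lget_eq_getElem _ x hx0 (by rw [List.length_map, hclen]; omega),
    List.getElem_map, lget_eq_getElem comp x hx0 (by rw [hclen]; omega)]

-- the invariant is re-established after accepting an edge
set_option maxHeartbeats 1000000 in
lemma mcoup_merge {L : Nat} {comp cd dem : List Int} {mst : List (Int × Int)}
    (h : MCoup L comp cd dem mst) {u v : Int}
    (hu0 : 0 ≤ u) (hu1 : u < (L : Int)) (hv0 : 0 ≤ v) (hv1 : v < (L : Int))
    (hne : lget comp u ≠ lget comp v) :
    MCoup L (comp.map fun c => if c = lget comp v then lget comp u else c)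
      (lset cd (lget comp u) (lget cd (lget comp u) + lget cd (lget comp v)))
      dem (mst ++ [(u, v)]) := by
  obtain ⟨hclen, hcdlen, hcrange, hE, hiff, hsum⟩ := h
  have hcub := hcrange u hu0 hu1
  have hcvb := hcrange v hv0 hv1
  have hmc : MCoup L comp cd dem mst := ⟨hclen, hcdlen, hcrange, hE, hiff, hsum⟩
  have hrel := fun {x : Int} (hx0 : 0 ≤ x) (hx1 : x < (L : Int)) =>
    lget_map_relabel hclen (lget comp u) (lget comp v) hx0 hx1
  refine ⟨by rw [List.length_map]; exact hclen, by rw [length_lset]; exact hcdlen, ?_, ?_, ?_, ?_⟩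
  · intro x hx0 hx1
    rw [hrel hx0 hx1]
    split
    · exact hcub
    · exact hcrange x hx0 hx1
  · intro p hp
    rw [List.mem_append] at hp
    rcases hp with hp | hp
    · exact hE p hp
    · simp at hp
      rw [hp]
      exact ⟨⟨hu0, hu1⟩, hv0, hv1⟩
  · intro x y hx0 hx1 hy0 hy1
    rw [hrel hx0 hx1, hrel hy0 hy1,
      collapse_eq_iff _ _ (lget comp u) (lget comp v) hne, conn_snoc,
      hiff x y hx0 hx1 hy0 hy1]
    have hxu := hiff x u hx0 hx1 hu0 hu1
    have hxv := hiff x v hx0 hx1 hv0 hv1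
    have hyu := hiff y u hy0 hy1 hu0 hu1
    have hyv := hiff y v hy0 hy1 hv0 hv1
    constructor
    · rintro (h1 | ⟨hx, hy⟩)
      · exact Or.inl h1
      · rcases hx with hx | hx <;> rcases hy with hy | hy
        · -- x ~ v, y ~ v
          exact Or.inl (conn_trans (hxv.1 hx) (conn_symm (hyv.1 hy)))
        · -- x ~ v, y ~ u
          exact Or.inr (Or.inr ⟨hxv.1 hx, hyu.1 hy⟩)
        · -- x ~ u, y ~ v
          exact Or.inr (Or.inl ⟨hxu.1 hx, hyv.1 hy⟩)
        · -- x ~ u, y ~ u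
          exact Or.inl (conn_trans (hxu.1 hx) (conn_symm (hyu.1 hy)))
    · rintro (h1 | ⟨hx, hy⟩ | ⟨hx, hy⟩)
      · exact Or.inl h1
      · exact Or.inr ⟨Or.inr (hxu.2 hx), Or.inl (hyv.2 hy)⟩
      · exact Or.inr ⟨Or.inl (hxv.2 hx), Or.inr (hyu.2 hy)⟩
  · intro x hx0 hx1
    have hLx := hrel hx0 hx1
    by_cases hhit : lget comp x = lget comp u ∨ lget comp x = lget comp v
    · have hx' : lget (comp.map fun c => if c = lget comp v then lget comp u else c) x =
          lget comp u := by
        rw [hLx]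
        rcases hhit with hq | hq
        · rw [if_neg (by rw [hq]; exact hne), hq]
        · rw [if_pos hq]
      rw [hx', lget_lset_self cd (lget comp u) _ hcub.1 (by rw [hcdlen]; omega)]
      have hfe : (PySem.List.pyRange 0 (L : Int) 1).filter
          (fun y => lget (comp.map fun c => if c = lget comp v then lget comp u else c) y == lget comp u) =
          (PySem.List.pyRange 0 (L : Int) 1).filter
          (fun y => (lget comp y == lget comp u) || (lget comp y == lget comp v)) := by
        apply List.filter_congr
        intro y hy
        rw [PySem.List.mem_pyRange_one] at hy
        rw [hrel hy.1 hy.2]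
        by_cases h1 : lget comp y = lget comp v
        · simp [h1]
        · by_cases h2 : lget comp y = lget comp u <;> simp [h1, h2]
      rw [classSum, hfe, sum_map_filter_or _ _ _ _ (by
        intro a _ hcon
        obtain ⟨h1', h2'⟩ := hcon
        rw [beq_iff_eq] at h1' h2'
        exact hne (h1'.symm.trans h2'))]
      rw [← classSum, ← classSum, ← hsum u hu0 hu1, ← hsum v hv0 hv1]
    · rw [not_or] at hhit
      have hx' : lget (comp.map fun c => if c = lget comp v then lget comp u else c) x =
          lget comp x := by
        rw [hLx, if_neg hhit.2]
      rw [hx', lget_lset_ne cd (lget comp u) _ (lget comp x) hcub.1 (by rw [hcdlen]; omega)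
        (hcrange x hx0 hx1).1 (by rw [hcdlen]; exact (hcrange x hx0 hx1).2) hhit.1]
      have hfe : (PySem.List.pyRange 0 (L : Int) 1).filter
          (fun y => lget (comp.map fun c => if c = lget comp v then lget comp u else c) y == lget comp x) =
          (PySem.List.pyRange 0 (L : Int) 1).filter (fun y => lget comp y == lget comp x) := by
        apply List.filter_congr
        intro y hy
        rw [PySem.List.mem_pyRange_one] at hy
        rw [hrel hy.1 hy.2]
        by_cases h1 : lget comp y = lget comp v
        · simp [h1, Ne.symm hhit.1, Ne.symm hhit.2]
        · simp [h1]
      rw [classSum, hfe, ← classSum]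
      exact hsum x hx0 hx1

-- the label loop agrees with B's loop under the invariant
set_option maxHeartbeats 2000000 in
lemma mloop_eq_bloop (n : Int) (caps dem : List Int) (L : Nat) (hLn : (L : Int) = n) :
    ∀ (es : List (List Int)) (comp cd : List Int) (mst : List (Int × Int)) (tc : Int),
    (∀ e ∈ es, e.length = 3 ∧ ∀ x ∈ e.take 2, 0 ≤ x ∧ x < n) →
    MCoup L comp cd dem mst →
    midLoop n caps es comp cd tc mst = bLoop n caps dem es mst tc := by
  intro es
  induction es with
  | nil => intro comp cd mst tc _ _; rfl
  | cons e rest ih =>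
    intro comp cd mst tc hes hc
    obtain ⟨he3, hebd⟩ := hes e (by simp)
    obtain ⟨u, v, c, rfl⟩ : ∃ u v c, e = [u, v, c] := by
      rcases e with _ | ⟨u, e⟩
      · simp at he3
      rcases e with _ | ⟨v, e⟩
      · simp at he3
      rcases e with _ | ⟨c, e⟩
      · simp at he3
      rcases e with _ | ⟨d, e⟩
      · exact ⟨u, v, c, rfl⟩
      · simp at he3
    have hu := hebd u (by simp)
    have hv := hebd v (by simp)
    have hrest : ∀ e' ∈ rest, e'.length = 3 ∧ ∀ x ∈ e'.take 2, 0 ≤ x ∧ x < n :=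
      fun e' he' => hes e' (by simp [he'])
    have hgu : lget [u, v, c] 0 = u := by
      rw [lget_eq_getElem _ 0 (by omega) (by simp)]; rfl
    have hgv : lget [u, v, c] 1 = v := by
      rw [lget_eq_getElem _ 1 (by omega) (by simp)]; rfl
    have hgc : lget [u, v, c] 2 = c := by
      rw [lget_eq_getElem _ 2 (by omega) (by simp)]; rfl
    have hu0 : 0 ≤ u := hu.1
    have hu1 : u < (L : Int) := by omega
    have hv0 : 0 ≤ v := hv.1
    have hv1 : v < (L : Int) := by omega
    obtain ⟨hclen, hcdlen, hcrange, hE, hiff, hsum⟩ := hc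
    have hmc : MCoup L comp cd dem mst := ⟨hclen, hcdlen, hcrange, hE, hiff, hsum⟩
    have hguard : PySem.Set.contains (bComponent mst u) v = true ↔
        lget comp u = lget comp v := by
      rw [PySem.Set.contains_iff, mem_bComponent]
      exact (hiff u v hu0 hu1 hv0 hv1).symm
    show midLoop n caps ([u, v, c] :: rest) comp cd tc mst =
      bLoop n caps dem ([u, v, c] :: rest) mst tc
    simp only [midLoop, bLoop, hgu, hgv, hgc]
    by_cases hsame : lget comp u = lget comp v
    · rw [if_pos hsame, if_pos (hguard.2 hsame)]
      exact ih comp cd mst tc hrest hmc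
    · have hgneg : ¬ (PySem.Set.contains (bComponent mst u) v = true) :=
        fun hcon => hsame (hguard.1 hcon)
      rw [if_neg hsame, if_neg hgneg]
      have hsu := component_sum hmc hu0 hu1
      have hsv := component_sum hmc hv0 hv1
      rw [hsu, hsv]
      by_cases hcap : lget cd (lget comp u) + lget cd (lget comp v) ≤
          min (lget caps u) (lget caps v)
      · rw [if_neg (by omega), if_pos hcap]
        by_cases hbreak : ((mst ++ [(u, v)]).length : Int) = n - 1
        · rw [if_pos hbreak, if_pos hbreak]
        · rw [if_neg hbreak, if_neg hbreak]
          exact ih _ _ _ _ hrest (mcoup_merge hmc hu0 hu1 hv0 hv1 hsame)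
      · rw [if_pos (by omega), if_neg hcap]
        exact ih comp cd mst tc hrest hmc

-- ===== VERDICT (by name: the statement is the Claim_ definition above) =====
set_option maxHeartbeats 1000000 in
theorem capacitated_mst_spec : Claim_equal_capacitated_mst := by
  intro n edges caps dem root hdom hpre
  unfold Spec_capacitated_mst
  rcases hpre with hnil | ⟨hn, hcap, hdm, hedges⟩
  · subst hnil
    have hs : PySem.List.sorted ([] : List (List Int)) (fun e => lget e 2) false = [] :=
      (PySem.List.sorted_eq_nil_iff _ _ _).2 rfl
    unfold capacitated_mst capacitated_mst_alt
    rw [hs]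
    rfl
  · have hLn : ((n.toNat : Nat) : Int) = n := by omega
    have hwf : ∀ e ∈ PySem.List.sorted edges (fun e => lget e 2) false,
        e.length = 3 ∧ ∀ x ∈ e.take 2, 0 ≤ x ∧ x < n := by
      intro e he
      exact hedges e ((PySem.List.mem_sorted _ _ _ _).1 he)
    unfold capacitated_mst capacitated_mst_alt
    rw [loop_eq n caps n.toNat hLn _ _ _ _ _ _ _ _ hwf (coupled_init n dem hn hdm)]
    exact mloop_eq_bloop n caps dem n.toNat hLn _ _ _ _ _ hwf (mcoup_init n dem hn hdm)
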